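-- pv_equiv track=rewrite | github.com/nithin-nexusai/AI_AUTOMATION | chicx-bot/scripts/import_faqs.py | chunk_text_as_faqs
-- ===== SOURCE A (Python) =====
-- def chunk_text_as_faqs(text: str, chunk_size: int = 500) -> list[dict[str, str]]:
--     """Chunk text into FAQ-like entries when no Q&A pattern is found."""
--     chunks = []
--     paragraphs = [p.strip() for p in text.split("\n\n") if p.strip()]
--
--     current_chunk = []
--     current_length = 0
--
--     for para in paragraphs:
--         para_length = len(para)
--
--         if current_length + para_length > chunk_size and current_chunk:
--             # Save current chunk
--             chunk_text = " ".join(current_chunk)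
--             chunks.append({
--                 "question": chunk_text[:100] + "...",  # First 100 chars as question
--                 "answer": chunk_text,
--                 "category": "General",
--             })
--             current_chunk = []
--             current_length = 0
--
--         current_chunk.append(para)
--         current_length += para_length
--
--     # Save last chunk
--     if current_chunk:
--         chunk_text = " ".join(current_chunk)
--         chunks.append({
--             "question": chunk_text[:100] + "...",
--             "answer": chunk_text,
--             "category": "General",
--         })
--
--     return chunks
-- ===== SOURCE B (Python) =====
-- def chunk_text_as_faqs(text: str, chunk_size: int = 500) -> list[dict[str, str]]:
--     """Chunk text into FAQ-like entries when no Q&A pattern is found."""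
--     paras = [p.strip() for p in text.split("\n\n") if p.strip()]
--     chunks = []
--     while paras:
--         group, paras = _take_group(paras, chunk_size)
--         joined = " ".join(group)
--         chunks.append({
--             "question": joined[:100] + "...",
--             "answer": joined,
--             "category": "General",
--         })
--     return chunks
--
--
-- def _take_group(paras, chunk_size):
--     """Split off one greedy group: the first paragraph, plus following
--     paragraphs while the running total length stays within chunk_size."""
--     total = len(paras[0])
--     i = 1
--     while i < len(paras) and total + len(paras[i]) <= chunk_size:
--         total += len(paras[i])
--         i += 1
--     return paras[:i], paras[i:]
-- ===== Notes on version B (the rewrite author's own statement) =====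
-- stated objective: alternative
-- what changed: B drives the output by peeling one complete group at a time (a _take_group helper scans forward from the group's head and splits the paragraph list), emitting each entry as the group starts, instead of A's single fold carrying chunks/current_chunk/current_length state with a flush-on-overflow branch plus a duplicated final flush.
import Mathlib
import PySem

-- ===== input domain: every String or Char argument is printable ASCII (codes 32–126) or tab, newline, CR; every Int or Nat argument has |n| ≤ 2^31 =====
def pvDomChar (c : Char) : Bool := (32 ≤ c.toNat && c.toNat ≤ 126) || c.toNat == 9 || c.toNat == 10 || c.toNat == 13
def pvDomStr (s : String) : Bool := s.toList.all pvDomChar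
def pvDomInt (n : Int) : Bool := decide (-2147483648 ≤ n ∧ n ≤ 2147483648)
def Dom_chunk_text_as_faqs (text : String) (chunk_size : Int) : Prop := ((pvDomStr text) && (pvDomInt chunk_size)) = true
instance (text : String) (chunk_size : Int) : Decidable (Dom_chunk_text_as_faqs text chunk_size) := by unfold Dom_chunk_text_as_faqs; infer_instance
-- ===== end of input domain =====

-- B peels one greedy group at a time via a _take_group helper and emits each entry at group start, instead of A's fold with flush-on-overflow state (objective: alternative).


-- ===== PORT A =====
-- transliteration of A; the dict literal appears inline twice, as in the Python
def chunk_text_as_faqs (text : String) (chunk_size : Int) : List (List (String × String)) :=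
  let paragraphs : List (List Char) :=
    ((PySem.Chars.splitOn text.toList ['\n','\n']).map PySem.Chars.strip).filter (· ≠ [])
  let s := paragraphs.foldl
    (fun (s : List (List (String × String)) × List (List Char) × Int) para =>
      let (chunks, current_chunk, current_length) := s
      if current_length + (para.length : Int) > chunk_size ∧ current_chunk ≠ [] then
        let chunk_text := PySem.Chars.join [' '] current_chunk
        (chunks ++ [[("question", String.ofList (PySem.Chars.slice chunk_text none (some 100) ++ ['.','.','.'])),
                     ("answer", String.ofList chunk_text),
                     ("category", "General")]],
         ([] ++ [para]), (0 + (para.length : Int)))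
      else (chunks, current_chunk ++ [para], current_length + (para.length : Int)))
    ([], [], 0)
  if s.2.1 ≠ [] then
    let chunk_text := PySem.Chars.join [' '] s.2.1
    s.1 ++ [[("question", String.ofList (PySem.Chars.slice chunk_text none (some 100) ++ ['.','.','.'])),
             ("answer", String.ofList chunk_text),
             ("category", "General")]]
  else s.1

-- ===== PORT B =====
-- _take_group's inner while loop, as structural recursion over the tail:
-- acc is paras[:i] built so far, the result is (paras[:i], paras[i:])
def pvTakeAux (chunk_size : Int) (total : Int) (acc : List (List Char)) :
    List (List Char) → List (List Char) × List (List Char)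
  | [] => (acc, [])
  | p :: rest =>
    if total + (p.length : Int) ≤ chunk_size then
      pvTakeAux chunk_size (total + (p.length : Int)) (acc ++ [p]) rest
    else (acc, p :: rest)

-- termination measure for the outer loop: _take_group never returns more than it was given past the head
theorem pvTakeAux_len (cs : Int) (t : Int) (acc ps : List (List Char)) :
    (pvTakeAux cs t acc ps).2.length ≤ ps.length := by
  induction ps generalizing t acc with
  | nil => simp [pvTakeAux]
  | cons p rest ih =>
    simp only [pvTakeAux]
    split
    · exact le_trans (ih _ _) (Nat.le_succ _)
    · simp

-- the dict literal Source B appends for one group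
def pvFaqEntry (joined : List Char) : List (String × String) :=
  [("question", String.ofList (PySem.Chars.slice joined none (some 100) ++ ['.','.','.'])),
   ("answer", String.ofList joined),
   ("category", "General")]

-- Source B's outer while loop: peel one group with _take_group, emit its entry, continue on the rest
def pvChunkLoop (chunk_size : Int) : List (List Char) → List (List (String × String))
  | [] => []
  | p :: rest =>
    let t := pvTakeAux chunk_size (p.length : Int) [p] rest
    pvFaqEntry (PySem.Chars.join [' '] t.1) :: pvChunkLoop chunk_size t.2
  termination_by ps => ps.length
  decreasing_by
    exact Nat.lt_succ_of_le (pvTakeAux_len _ _ _ _)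

def chunk_text_as_faqs_alt (text : String) (chunk_size : Int) : List (List (String × String)) :=
  let paras : List (List Char) :=
    ((PySem.Chars.splitOn text.toList ['\n','\n']).map PySem.Chars.strip).filter (· ≠ [])
  pvChunkLoop chunk_size paras

-- ===== PRECONDITION & SPEC =====
def Spec_chunk_text_as_faqs (text : String) (chunk_size : Int) (out : List (List (String × String))) : Prop := out = chunk_text_as_faqs_alt text chunk_size
instance (text : String) (chunk_size : Int) (out : List (List (String × String))) : Decidable (Spec_chunk_text_as_faqs text chunk_size out) := by unfold Spec_chunk_text_as_faqs; infer_instance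

-- ===== CLAIM (what is proved, stated in full; the proofs are below) =====
def Claim_equal_chunk_text_as_faqs : Prop := ∀ (text : String) (chunk_size : Int), Dom_chunk_text_as_faqs text chunk_size → Spec_chunk_text_as_faqs text chunk_size (chunk_text_as_faqs text chunk_size)

-- ===== LEMMAS AND PROOFS =====

-- A's fold from a nonempty current chunk (whose summed length is len) finishes the group
-- exactly as _take_group would extend it, then proceeds like B's loop on the rest.
theorem pv_fold_eq (cs : Int) (ps : List (List Char))
    (chunks : List (List (String × String))) (cur : List (List Char)) (len : Int)
    (h : cur ≠ []) :
    (let s := ps.foldl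
      (fun (s : List (List (String × String)) × List (List Char) × Int) para =>
        let (chunks, current_chunk, current_length) := s
        if current_length + (para.length : Int) > cs ∧ current_chunk ≠ [] then
          let chunk_text := PySem.Chars.join [' '] current_chunk
          (chunks ++ [[("question", String.ofList (PySem.Chars.slice chunk_text none (some 100) ++ ['.','.','.'])),
                       ("answer", String.ofList chunk_text),
                       ("category", "General")]],
           ([] ++ [para]), (0 + (para.length : Int)))
        else (chunks, current_chunk ++ [para], current_length + (para.length : Int)))
      (chunks, cur, len);
     if s.2.1 ≠ [] then
       let chunk_text := PySem.Chars.join [' '] s.2.1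
       s.1 ++ [[("question", String.ofList (PySem.Chars.slice chunk_text none (some 100) ++ ['.','.','.'])),
                ("answer", String.ofList chunk_text),
                ("category", "General")]]
     else s.1)
    = chunks ++ (let t := pvTakeAux cs len cur ps;
                 pvFaqEntry (PySem.Chars.join [' '] t.1) :: pvChunkLoop cs t.2) := by
  induction ps generalizing chunks cur len with
  | nil =>
    simp [pvTakeAux, pvChunkLoop, pvFaqEntry, h]
  | cons p rest ih =>
    simp only [List.foldl_cons]
    by_cases hc : len + (p.length : Int) ≤ cs
    · have hneg : ¬ (len + (p.length : Int) > cs ∧ cur ≠ []) := by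
        intro hgt; exact absurd hc (not_le.mpr hgt.1)
      rw [if_neg hneg]
      rw [ih chunks (cur ++ [p]) (len + (p.length : Int)) (by simp)]
      simp [pvTakeAux, hc]
    · have hpos : len + (p.length : Int) > cs ∧ cur ≠ [] := ⟨lt_of_not_ge hc, h⟩
      rw [if_pos hpos]
      rw [ih (chunks ++ [[("question", String.ofList (PySem.Chars.slice (PySem.Chars.join [' '] cur) none (some 100) ++ ['.','.','.'])),
                          ("answer", String.ofList (PySem.Chars.join [' '] cur)),
                          ("category", "General")]])
             ([] ++ [p]) (0 + (p.length : Int)) (by simp)]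
      simp only [pvTakeAux, if_neg hc]
      simp [pvChunkLoop, pvFaqEntry]

-- ===== VERDICT (by name: the statement is the Claim_ definition above) =====
theorem chunk_text_as_faqs_spec : Claim_equal_chunk_text_as_faqs := by
  intro text chunk_size _
  unfold Spec_chunk_text_as_faqs chunk_text_as_faqs chunk_text_as_faqs_alt
  cases hp : ((PySem.Chars.splitOn text.toList ['\n','\n']).map PySem.Chars.strip).filter (· ≠ []) with
  | nil => simp [pvChunkLoop]
  | cons p rest =>
    simp only [List.foldl_cons]
    have hstep : ¬ ((0 : Int) + (p.length : Int) > chunk_size ∧ ([] : List (List Char)) ≠ []) := by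
      simp
    rw [if_neg hstep]
    rw [pv_fold_eq chunk_size rest [] ([] ++ [p]) (0 + (p.length : Int)) (by simp)]
    simp [pvChunkLoop]
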